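-- pv_equiv track=rewrite | github.com/IJSComplexMatter/cddm | cddm/multitau.py | _determine_lengths
-- ===== SOURCE A (Python) =====
-- def _determine_lengths(length, n, period, nlevel):
--     assert n > 4
--     n_fast = period * n
--     n_slow = n
--     if nlevel is None:
--         n_decades = 0
--         while length// (2**(n_decades)) >= n:
--             n_decades += 1
--         nlevel = n_decades -1
--     nlevel = int(nlevel)
--     assert nlevel >= 0
--     return n_fast, n_slow, nlevel
-- ===== SOURCE B (Python) =====
-- def _determine_lengths(length, n, period, nlevel):
--     assert n > 4
--     n_fast = period * n
--     n_slow = n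
--     if nlevel is None:
--         nlevel = (length // n).bit_length() - 1
--     nlevel = int(nlevel)
--     assert nlevel >= 0
--     return n_fast, n_slow, nlevel
-- ===== Notes on version B (the rewrite author's own statement) =====
-- stated objective: simpler
-- what changed: Replaces the halving while-loop that counts decades with the closed form (length // n).bit_length() - 1.
import Mathlib
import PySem

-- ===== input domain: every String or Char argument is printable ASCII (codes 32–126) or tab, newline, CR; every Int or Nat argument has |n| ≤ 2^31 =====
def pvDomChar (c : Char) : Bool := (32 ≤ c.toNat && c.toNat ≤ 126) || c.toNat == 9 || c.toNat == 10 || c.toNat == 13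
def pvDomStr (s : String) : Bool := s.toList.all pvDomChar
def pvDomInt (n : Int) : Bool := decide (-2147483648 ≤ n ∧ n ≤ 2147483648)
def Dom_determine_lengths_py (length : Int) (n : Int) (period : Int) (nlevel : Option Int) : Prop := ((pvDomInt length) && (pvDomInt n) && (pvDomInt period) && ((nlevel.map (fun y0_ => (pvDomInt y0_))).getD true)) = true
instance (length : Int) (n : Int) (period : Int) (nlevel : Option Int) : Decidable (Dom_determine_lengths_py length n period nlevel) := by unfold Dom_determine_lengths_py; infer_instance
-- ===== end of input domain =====

-- B replaces A's decade-counting halving loop by the closed form (length // n).bit_length() - 1 (objective: simpler).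

-- ===== PORT A =====
-- the `while length // (2**n_decades) >= n` loop; fuel only makes it total
-- (under Pre_ the loop stops within 64 steps since |length| ≤ 2^31 on Dom)
def pvALoop (fuel : Nat) (length n : Int) (d : Nat) : Int :=
  match fuel with
  | 0 => (d : Int)
  | f + 1 =>
    if n ≤ PySem.Int.floordiv length ((2 : Int) ^ d) then pvALoop f length n (d + 1)
    else (d : Int)

def determine_lengths_py (length : Int) (n : Int) (period : Int) (nlevel : Option Int) : Int × Int × Int :=
  let n_fast := period * n
  let n_slow := n
  let nlevel' : Int :=
    match nlevel with
    | none => pvALoop 64 length n 0 - 1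
    | some k => k
  (n_fast, n_slow, nlevel')

-- ===== PORT B =====
def determine_lengths_py_alt (length : Int) (n : Int) (period : Int) (nlevel : Option Int) : Int × Int × Int :=
  let n_fast := period * n
  let n_slow := n
  match nlevel with
  | none => (n_fast, n_slow, (PySem.Int.bitLength (PySem.Int.floordiv length n) : Int) - 1)
  | some k => (n_fast, n_slow, k)

-- ===== PRECONDITION & SPEC =====
-- Pre_ is exactly where Python A returns: assert n > 4, and assert nlevel >= 0
-- (with nlevel=None the loop yields a nonnegative level iff length >= n).
def Pre_determine_lengths_py (length : Int) (n : Int) (period : Int) (nlevel : Option Int) : Prop :=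
  4 < n ∧ (if nlevel.isSome then 0 ≤ nlevel.getD 0 else n ≤ length)
instance (length : Int) (n : Int) (period : Int) (nlevel : Option Int) : Decidable (Pre_determine_lengths_py length n period nlevel) := by unfold Pre_determine_lengths_py; infer_instance

def pvWitness_determine_lengths_py : Int × Int × Int × Option Int := (20, 5, 1, none)

def Spec_determine_lengths_py (length : Int) (n : Int) (period : Int) (nlevel : Option Int) (out : Int × Int × Int) : Prop := out = determine_lengths_py_alt length n period nlevel
instance (length : Int) (n : Int) (period : Int) (nlevel : Option Int) (out : Int × Int × Int) : Decidable (Spec_determine_lengths_py length n period nlevel out) := by unfold Spec_determine_lengths_py; infer_instance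

-- ===== CLAIM (what is proved, stated in full; the proofs are below) =====
def Claim_equal_determine_lengths_py : Prop := ∀ (length : Int) (n : Int) (period : Int) (nlevel : Option Int), Dom_determine_lengths_py length n period nlevel → Pre_determine_lengths_py length n period nlevel → Spec_determine_lengths_py length n period nlevel (determine_lengths_py length n period nlevel)

-- ===== LEMMAS AND PROOFS =====

-- if the loop condition holds exactly for d < B, the loop returns B (given enough fuel)
lemma pvALoop_char (length n : Int) (B : Nat)
    (hcond : ∀ d : Nat, (n ≤ PySem.Int.floordiv length ((2 : Int) ^ d)) ↔ d < B) :
    ∀ (fuel d : Nat), d ≤ B → B ≤ d + fuel → pvALoop fuel length n d = (B : Int) := by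
  intro fuel
  induction fuel with
  | zero => intro d h1 h2; simp [pvALoop]; omega
  | succ f ih =>
    intro d h1 h2
    by_cases hd : d < B
    · rw [pvALoop, if_pos ((hcond d).2 hd)]
      exact ih (d + 1) (by omega) (by omega)
    · have : d = B := by omega
      rw [pvALoop, if_neg (by rw [hcond d]; omega)]
      exact congrArg _ this

lemma pow_le_iff_lt_bitLength (q : Int) (hq : 0 < q) (d : Nat) :
    (2 : Int) ^ d ≤ q ↔ d < PySem.Int.bitLength q := by
  have hq' : q = (q.natAbs : Int) := by omega
  have hcast : ((2 : Int) ^ d ≤ q) ↔ (2 ^ d ≤ q.natAbs) := by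
    rw [hq']; exact_mod_cast Iff.rfl
  rw [hcast]
  constructor
  · intro h
    have h2 := PySem.Int.lt_two_pow_bitLength q
    have : (2 : Nat) ^ d < 2 ^ PySem.Int.bitLength q := lt_of_le_of_lt h h2
    exact (Nat.pow_lt_pow_iff_right (by omega)).1 this
  · intro h
    have hne : q ≠ 0 := by omega
    have h2 := PySem.Int.two_pow_bitLength_le q hne
    calc (2 : Nat) ^ d ≤ 2 ^ (PySem.Int.bitLength q - 1) :=
          Nat.pow_le_pow_right (by omega) (by omega)
      _ ≤ q.natAbs := h2

theorem determine_lengths_py_spec : Claim_equal_determine_lengths_py := by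
  unfold Claim_equal_determine_lengths_py
  intro length n period nlevel hdom hpre
  unfold Spec_determine_lengths_py determine_lengths_py determine_lengths_py_alt
  obtain ⟨hn, hrest⟩ := hpre
  cases nlevel with
  | some k => rfl
  | none =>
    simp only
    congr 1; congr 1
    -- it remains: pvALoop 64 length n 0 - 1 = bitLength (length // n) - 1
    set q := PySem.Int.floordiv length n with hqdef
    have hnpos : (0 : Int) < n := by omega
    have hqpos : 0 < q := by
      have := (PySem.Int.le_floordiv_iff_mul_le (a := length) (b := n) (q := 1) hnpos).2
        (by simpa using hrest)
      omega
    set B := PySem.Int.bitLength q with hBdef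
    have hcond : ∀ d : Nat, (n ≤ PySem.Int.floordiv length ((2 : Int) ^ d)) ↔ d < B := by
      intro d
      have h2pos : (0 : Int) < (2 : Int) ^ d := by positivity
      rw [PySem.Int.le_floordiv_iff_mul_le h2pos]
      rw [← pow_le_iff_lt_bitLength q hqpos d, hqdef,
        PySem.Int.le_floordiv_iff_mul_le hnpos]
      constructor <;> intro h <;> linarith [h]
    -- bound on B from the domain: |length| ≤ 2^31 so q.natAbs < 2^64
    have hlb : length ≤ 2147483648 := by
      simp only [Dom_determine_lengths_py, pvDomInt] at hdom
      simp only [Bool.and_eq_true, decide_eq_true_eq] at hdom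
      exact hdom.1.1.1.2
    have hqle : q ≤ length := by
      have := (PySem.Int.le_floordiv_iff_mul_le (a := length) (b := n) (q := q) hnpos).1 le_rfl
      nlinarith
    have hB64 : B ≤ 64 := by
      by_contra hB
      have : (2 : Int) ^ (64 : Nat) ≤ q := (pow_le_iff_lt_bitLength q hqpos 64).2 (by omega)
      norm_num at this
      omega
    rw [pvALoop_char length n B hcond 64 0 (by omega) (by omega)]
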